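-- pv_equiv track=rewrite | github.com/FLOCK4H/AtomDucky | AtomDucky_no_ble/atoms/analyzer.py | analyze_payload_stream
-- ===== SOURCE A (Python) =====
-- def analyze_payload_stream(payload):
--     if isinstance(payload, bytes):
--         payload = payload.decode()
--     i = 0
--     while i < len(payload):
--         if payload[i] == "<":
--             end_index = payload.find(">", i)
--             if end_index != -1 and " " not in payload[i+1:end_index]:
--                 yield payload[i:end_index+1]
--                 i = end_index + 1
--                 continue
--         yield payload[i]
--         i += 1
-- ===== SOURCE B (Python) =====
-- def analyze_payload_stream(payload):
--     if isinstance(payload, bytes):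
--         payload = payload.decode()
--     n = len(payload)
--     # Stage 1: one backward pass precomputing, for every position, the index of
--     # the next '>' and the next ' ' at or after it (None if there is none).
--     next_gt = [None] * (n + 1)
--     next_sp = [None] * (n + 1)
--     for i in range(n - 1, -1, -1):
--         next_gt[i] = i if payload[i] == '>' else next_gt[i + 1]
--         next_sp[i] = i if payload[i] == ' ' else next_sp[i + 1]
--     # Stage 2: forward pass deciding each position from the tables.
--     i = 0
--     while i < n:
--         if payload[i] == '<':
--             g = next_gt[i + 1]
--             if g is not None and (next_sp[i + 1] is None or next_sp[i + 1] > g):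
--                 yield payload[i:g + 1]
--                 i = g + 1
--                 continue
--         yield payload[i]
--         i += 1
-- ===== Notes on version B (the rewrite author's own statement) =====
-- stated objective: alternative
-- what changed: A re-scans forward with str.find for '>' and rescans the slice for a space at every '<'; B first precomputes next-'>' and next-space occurrence arrays in one backward pass, then a forward pass decides each position with O(1) table lookups, so the per-'<' searches and slice rescans disappear.
import Mathlib
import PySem

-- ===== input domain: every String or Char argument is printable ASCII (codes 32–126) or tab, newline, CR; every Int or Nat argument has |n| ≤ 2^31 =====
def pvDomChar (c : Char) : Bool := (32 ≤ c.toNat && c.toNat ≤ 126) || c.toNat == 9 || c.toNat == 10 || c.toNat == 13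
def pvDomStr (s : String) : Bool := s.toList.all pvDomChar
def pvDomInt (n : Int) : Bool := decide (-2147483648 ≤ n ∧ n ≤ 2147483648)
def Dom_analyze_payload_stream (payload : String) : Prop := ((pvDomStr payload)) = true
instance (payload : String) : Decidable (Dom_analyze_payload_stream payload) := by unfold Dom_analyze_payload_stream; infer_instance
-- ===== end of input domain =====

-- B replaces A's per-'<' forward searches (str.find for '>' plus a slice rescan for ' ')
-- by a backward precomputation pass building next-'>' / next-' ' occurrence tables, then a
-- forward pass deciding each position by table lookup; objective: alternative.
-- Both Pythons are generators; the equivalence is about the sequence of yielded tokens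
-- (returned here as a list).

-- ===== PORT A =====
-- A's while-loop over the index i is ported as recursion on the remaining suffix (exact:
-- A reads no position < i, so payload.find(">", i) and the slices payload[i+1:end_index],
-- payload[i:end_index+1] become find/slice on the suffix; end_index is A's find result).
def aLoop : Nat → List Char → List String
  | 0, _ => []
  | _ + 1, [] => []
  | fuel + 1, c :: rest =>
    if c = '<' then
      if PySem.Chars.find (c :: rest) ['>'] ≠ -1 ∧
          PySem.Chars.isIn [' ']
            (PySem.List.slice (c :: rest) (some 1) (some (PySem.Chars.find (c :: rest) ['>']))) = false then
        String.ofList (PySem.List.slice (c :: rest) (some 0) (some (PySem.Chars.find (c :: rest) ['>'] + 1))) ::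
          aLoop fuel ((c :: rest).drop ((PySem.Chars.find (c :: rest) ['>']).toNat + 1))
      else
        String.ofList [c] :: aLoop fuel rest
    else
      String.ofList [c] :: aLoop fuel rest

def analyze_payload_stream (payload : String) : List String :=
  aLoop payload.toList.length payload.toList

-- ===== PORT B =====
-- Stage 1 of Source B: the backward pass filling next_gt / next_sp is a foldr producing, for
-- every suffix of the payload, the OFFSET (relative index) of the first occurrence of t in
-- that suffix — the relative rendering of Source B's absolute-index arrays.
def nextTable (t : Char) (s : List Char) : List (Option Nat) :=
  s.foldr (fun c acc => (if c = t then some 0 else (acc.headD none).map (· + 1)) :: acc) [none]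

-- Stage 2 of Source B: the forward while-loop; tg/ts are the (suffixes of the) two tables
-- aligned with the current suffix, so next_gt[i+1] is tg.tail.headD none, and after a tag
-- the jump i = g + 1 drops g+1 entries from the tables as well.
def bLoop : Nat → List Char → List (Option Nat) → List (Option Nat) → List String
  | 0, _, _, _ => []
  | _ + 1, [], _, _ => []
  | fuel + 1, c :: rest, tg, ts =>
    if c = '<' then
      match tg.tail.headD none with
      | some g =>
        if (match ts.tail.headD none with | none => true | some sp => g < sp) then
          String.ofList ('<' :: rest.take (g + 1)) ::
            bLoop fuel (rest.drop (g + 1)) (tg.tail.drop (g + 1)) (ts.tail.drop (g + 1))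
        else
          String.ofList [c] :: bLoop fuel rest tg.tail ts.tail
      | none => String.ofList [c] :: bLoop fuel rest tg.tail ts.tail
    else
      String.ofList [c] :: bLoop fuel rest tg.tail ts.tail

def analyze_payload_stream_alt (payload : String) : List String :=
  bLoop payload.toList.length payload.toList
    (nextTable '>' payload.toList) (nextTable ' ' payload.toList)

-- ===== PRECONDITION & SPEC =====
def Spec_analyze_payload_stream (payload : String) (out : List String) : Prop := out = analyze_payload_stream_alt payload
instance (payload : String) (out : List String) : Decidable (Spec_analyze_payload_stream payload out) := by unfold Spec_analyze_payload_stream; infer_instance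

-- ===== CLAIM (what is proved, stated in full; the proofs are below) =====
def Claim_equal_analyze_payload_stream : Prop := ∀ (payload : String), Dom_analyze_payload_stream payload → Spec_analyze_payload_stream payload (analyze_payload_stream payload)

-- ===== LEMMAS AND PROOFS =====

theorem singleton_prefix_iff (a : Char) (l : List Char) : [a] <+: l ↔ l.head? = some a := by
  constructor
  · rintro ⟨t, rfl⟩; rfl
  · intro h
    cases l with
    | nil => simp at h
    | cons x t => simp at h; exact ⟨t, by simp [h]⟩

theorem singleton_infix_iff (a : Char) (l : List Char) : [a] <:+: l ↔ a ∈ l := by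
  constructor
  · intro h; exact h.sublist.subset (List.mem_singleton_self a)
  · intro h
    obtain ⟨u, v, rfl⟩ := List.append_of_mem h
    exact ⟨u, v, by simp⟩

theorem dropWhile_head_false {p : Char → Bool} {l : List Char} {x : Char} {t : List Char}
    (h : l.dropWhile p = x :: t) : p x = false := by
  have := List.head_dropWhile_not p (l := l) (by simp [h])
  simpa [h] using this

-- no '>' at all: A's find is -1
theorem find_gt_none (s : List Char) (hs : ∀ x ∈ s, x ≠ '>') :
    PySem.Chars.find s ['>'] = -1 := by
  rw [PySem.Chars.find_eq_neg_one_iff, singleton_infix_iff]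
  intro h; exact hs _ h rfl

-- the first '>' of b ++ '>' :: after, with b '>'-free, is at index b.length
theorem find_gt_eq (b after : List Char) (hb : ∀ x ∈ b, x ≠ '>') :
    PySem.Chars.find (b ++ '>' :: after) ['>'] = (b.length : Int) := by
  have hpre : ['>'] <+: (b ++ '>' :: after).drop b.length := by
    rw [List.drop_left]; exact ⟨after, rfl⟩
  have h0 : 0 ≤ PySem.Chars.find (b ++ '>' :: after) ['>'] :=
    (PySem.Chars.find_nonneg_iff _ _).mpr ((singleton_infix_iff _ _).mpr (by simp))
  obtain ⟨hat, hmin⟩ := PySem.Chars.find_spec h0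
  have hlt : ¬ (PySem.Chars.find (b ++ '>' :: after) ['>']).toNat < b.length := by
    intro hlt
    rw [singleton_prefix_iff, List.head?_drop, List.getElem?_append_left hlt] at hat
    exact hb _ (List.mem_of_getElem? hat) rfl
  have hge : ¬ b.length < (PySem.Chars.find (b ++ '>' :: after) ['>']).toNat :=
    fun hgt => hmin b.length hgt hpre
  omega

-- the B-side tables: cons unfolding, head = first-occurrence offset, drop = table of the drop
theorem nextTable_cons (t c : Char) (s : List Char) :
    nextTable t (c :: s) =
      (if c = t then some 0 else ((nextTable t s).headD none).map (· + 1)) :: nextTable t s := rfl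

theorem head_nextTable (t : Char) (s : List Char) :
    (nextTable t s).headD none = s.findIdx? (· == t) := by
  induction s with
  | nil => rfl
  | cons c s ih =>
    rw [nextTable_cons, List.findIdx?_cons]
    simp only [List.headD_cons, ih]
    by_cases h : c = t <;> simp [h]

theorem nextTable_drop (t : Char) : ∀ (s : List Char) (n : Nat), n ≤ s.length →
    (nextTable t s).drop n = nextTable t (s.drop n) := by
  intro s
  induction s with
  | nil =>
    intro n hn
    rw [Nat.le_zero.mp hn]
    rfl
  | cons c s ih =>
    intro n hn
    cases n with
    | zero => rfl
    | succ n =>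
      rw [nextTable_cons, List.drop_succ_cons, List.drop_succ_cons]
      exact ih n (by simpa using hn)

-- findIdx? skips a prefix on which the predicate is false
theorem findIdx?_append_false (p : Char → Bool) (tw rest : List Char)
    (h : ∀ y ∈ tw, p y = false) :
    List.findIdx? p (tw ++ rest) = (List.findIdx? p rest).map (· + tw.length) := by
  induction tw with
  | nil => simp
  | cons c tw ih =>
    rw [List.cons_append, List.findIdx?_cons, if_neg (by simp [h c (by simp)]),
      ih (fun y hy => h y (by simp [hy]))]
    cases List.findIdx? p rest
    · simp
    · simp
      omega

theorem key (fuel : Nat) : ∀ (s : List Char), s.length ≤ fuel →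
    aLoop fuel s = bLoop fuel s (nextTable '>' s) (nextTable ' ' s) := by
  induction fuel with
  | zero => intro s _; rfl
  | succ fuel ih =>
    intro s hs
    cases s with
    | nil => rfl
    | cons c rest =>
      have hlen0 : rest.length ≤ fuel := by
        simp only [List.length_cons] at hs; omega
      by_cases hc : c = '<'
      case neg =>
        simp only [aLoop, bLoop, nextTable_cons, List.tail_cons, if_neg hc]
        exact congrArg _ (ih rest hlen0)
      case pos =>
        subst hc
        have hbm : ∀ x ∈ rest.takeWhile (fun y => y ≠ '>' && y ≠ ' '),
            x ≠ '>' ∧ x ≠ ' ' := by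
          intro x hx
          have := List.mem_takeWhile_imp hx
          simp only [Bool.and_eq_true, decide_eq_true_eq, ne_eq] at this
          simpa using this
        cases hd : rest.dropWhile (fun y => y ≠ '>' && y ≠ ' ') with
        | nil =>
          have hrest : rest = rest.takeWhile (fun y => y ≠ '>' && y ≠ ' ') := by
            conv_lhs => rw [← List.takeWhile_append_dropWhile
              (p := fun y => y ≠ '>' && y ≠ ' ') (l := rest)]
            rw [hd, List.append_nil]
          have hfindIdx : rest.findIdx? (· == '>') = none := by
            rw [hrest, show rest.takeWhile (fun y => y ≠ '>' && y ≠ ' ') =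
              rest.takeWhile (fun y => y ≠ '>' && y ≠ ' ') ++ [] by simp,
              findIdx?_append_false _ _ _ (by intro y hy; simp [(hbm y hy).1])]
            rfl
          have hfind : PySem.Chars.find ('<' :: rest) ['>'] = -1 := by
            apply find_gt_none
            intro x hx
            rcases List.mem_cons.mp hx with h | h
            · subst h; decide
            · exact (hbm x (hrest ▸ h)).1
          have hA : aLoop (fuel + 1) ('<' :: rest) = String.ofList ['<'] :: aLoop fuel rest := by
            simp only [aLoop]
            rw [hfind]
            simp
          have hB : bLoop (fuel + 1) ('<' :: rest)
              (nextTable '>' ('<' :: rest)) (nextTable ' ' ('<' :: rest)) =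
              String.ofList ['<'] :: bLoop fuel rest
                (nextTable '>' rest) (nextTable ' ' rest) := by
            simp only [bLoop, nextTable_cons, List.tail_cons]
            rw [head_nextTable, hfindIdx]
            simp
          rw [hA, hB]
          exact congrArg _ (ih rest hlen0)
        | cons x after =>
          have hxf : (fun y => y ≠ '>' && y ≠ ' ') x = false := dropWhile_head_false hd
          have hrest0 : rest = rest.takeWhile (fun y => y ≠ '>' && y ≠ ' ') ++ x :: after := by
            conv_lhs => rw [← List.takeWhile_append_dropWhile
              (p := fun y => y ≠ '>' && y ≠ ' ') (l := rest)]
            rw [hd]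
          obtain ⟨tw, htw, hbm', hrest'⟩ :
              ∃ tw, tw = rest.takeWhile (fun y => y ≠ '>' && y ≠ ' ') ∧
                (∀ y ∈ tw, y ≠ '>' ∧ y ≠ ' ') ∧ rest = tw ++ x :: after := ⟨_, rfl, hbm, hrest0⟩
          subst hrest'
          have hgfree : ∀ y ∈ tw, (y == '>') = false := by
            intro y hy; simp [(hbm' y hy).1]
          have hsfree : ∀ y ∈ tw, (y == ' ') = false := by
            intro y hy; simp [(hbm' y hy).2]
          by_cases hxgt : x = '>'
          case pos =>
            subst hxgt
            -- B's tables: first '>' of rest is at offset tw.length; first ' ' (if any) is beyond it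
            have hg : (tw ++ '>' :: after).findIdx? (· == '>') = some tw.length := by
              rw [findIdx?_append_false _ _ _ hgfree, List.findIdx?_cons]
              simp
            have hspv : (tw ++ '>' :: after).findIdx? (· == ' ') =
                ((after.findIdx? (· == ' ')).map (· + 1)).map (· + tw.length) := by
              rw [findIdx?_append_false _ _ _ hsfree, List.findIdx?_cons]
              simp
            have hbtok : (tw ++ '>' :: after).take (tw.length + 1) = tw ++ ['>'] := by
              rw [List.take_append]; simp
            have hbdrop : (tw ++ '>' :: after).drop (tw.length + 1) = after := by
              rw [List.drop_append]; simp
            have hlenr : tw.length + 1 ≤ (tw ++ '>' :: after).length := by simp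
            have hB : bLoop (fuel + 1) ('<' :: (tw ++ '>' :: after))
                (nextTable '>' ('<' :: (tw ++ '>' :: after)))
                (nextTable ' ' ('<' :: (tw ++ '>' :: after))) =
                String.ofList ('<' :: (tw ++ ['>'])) :: bLoop fuel after
                  (nextTable '>' after) (nextTable ' ' after) := by
              simp only [bLoop, nextTable_cons, List.tail_cons]
              rw [head_nextTable, head_nextTable, hg, hspv]
              cases after.findIdx? (· == ' ') with
              | none => simp [hbtok, hbdrop, nextTable_drop _ _ _ hlenr]
              | some k => simp [hbtok, hbdrop, nextTable_drop _ _ _ hlenr]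
            -- A finds the '>' at absolute index tw.length + 1, and the slice between
            -- '<' and it is exactly the (space-free) scanned block tw.
            have hcons : ('<' :: (tw ++ '>' :: after)) = ('<' :: tw) ++ '>' :: after := by
              simp
            have hfind : PySem.Chars.find ('<' :: (tw ++ '>' :: after)) ['>'] =
                ((tw.length + 1 : Nat) : Int) := by
              rw [hcons]
              have := find_gt_eq ('<' :: tw) after (by
                intro y hy
                rcases List.mem_cons.mp hy with h | h
                · subst h; decide
                · exact (hbm' y h).1)
              simpa using this
            have hslice : PySem.List.slice ('<' :: (tw ++ '>' :: after)) (some 1)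
                (some ((tw.length + 1 : Nat) : Int)) = tw := by
              rw [PySem.List.slice_of_nonneg _ (by omega) (by omega)
                (by simp only [List.length_cons, List.length_append]; omega)
                (by simp only [List.length_cons, List.length_append]; omega)]
              simp only [Int.toNat_one, Int.toNat_natCast, List.drop_one, List.tail_cons,
                Nat.add_sub_cancel]
              exact List.take_left
            have hspace : PySem.Chars.isIn [' '] tw = false := by
              rw [PySem.Chars.isIn_eq_false_iff, singleton_infix_iff]
              intro hmem; exact (hbm' _ hmem).2 rfl
            have htok : PySem.List.slice ('<' :: (tw ++ '>' :: after)) (some 0)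
                (some (((tw.length + 1 : Nat) : Int) + 1)) = '<' :: (tw ++ ['>']) := by
              rw [PySem.List.slice_zero_start]
              rw [show (((tw.length + 1 : Nat) : Int) + 1) = ((tw.length + 2 : Nat) : Int) by
                push_cast; ring]
              rw [PySem.List.slice_to _ (by omega), Int.toNat_natCast]
              rw [show tw.length + 2 = (tw.length + 1) + 1 from rfl, List.take_succ_cons,
                List.take_append, List.take_of_length_le (by omega), Nat.add_sub_cancel_left]
              rw [show (1 : Nat) = 0 + 1 from rfl, List.take_succ_cons, List.take_zero]
            have hdrop : ('<' :: (tw ++ '>' :: after)).drop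
                ((((tw.length + 1 : Nat) : Int)).toNat + 1) = after := by
              rw [Int.toNat_natCast, show tw.length + 1 + 1 = (tw.length + 1) + 1 from rfl,
                List.drop_succ_cons, List.drop_append, List.drop_of_length_le (by omega),
                List.nil_append, Nat.add_sub_cancel_left]
              rw [show (1 : Nat) = 0 + 1 from rfl, List.drop_succ_cons, List.drop_zero]
            have hA : aLoop (fuel + 1) ('<' :: (tw ++ '>' :: after)) =
                String.ofList ('<' :: (tw ++ ['>'])) :: aLoop fuel after := by
              simp only [aLoop]
              rw [hfind, hslice, htok, hdrop,
                if_pos (⟨by omega, hspace⟩ :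
                  ((tw.length + 1 : Nat) : Int) ≠ -1 ∧ PySem.Chars.isIn [' '] tw = false)]
              simp
            rw [hA, hB]
            exact congrArg _ (ih after
              (by simp only [List.length_append, List.length_cons] at hlen0; omega))
          case neg =>
            -- x is the blocking space: both guards are false (B: the first '>', if any,
            -- lies beyond the space; A: same fact via find and its slice).
            have hxsp : x = ' ' := by
              simp only [Bool.and_eq_false_iff, decide_eq_false_iff_not, ne_eq,
                not_not] at hxf
              rcases hxf with h | h
              · exact absurd h hxgt
              · exact h
            subst hxsp
            have hspv : (tw ++ ' ' :: after).findIdx? (· == ' ') = some tw.length := by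
              rw [findIdx?_append_false _ _ _ hsfree, List.findIdx?_cons]
              simp
            have hgv : (tw ++ ' ' :: after).findIdx? (· == '>') =
                ((after.findIdx? (· == '>')).map (· + 1)).map (· + tw.length) := by
              rw [findIdx?_append_false _ _ _ hgfree, List.findIdx?_cons]
              simp
            have hB : bLoop (fuel + 1) ('<' :: (tw ++ ' ' :: after))
                (nextTable '>' ('<' :: (tw ++ ' ' :: after)))
                (nextTable ' ' ('<' :: (tw ++ ' ' :: after))) =
                String.ofList ['<'] :: bLoop fuel (tw ++ ' ' :: after)
                  (nextTable '>' (tw ++ ' ' :: after)) (nextTable ' ' (tw ++ ' ' :: after)) := by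
              simp only [bLoop, nextTable_cons, List.tail_cons]
              rw [head_nextTable, head_nextTable, hspv, hgv]
              cases after.findIdx? (· == '>') with
              | none => simp
              | some k => simp
            have hA : aLoop (fuel + 1) ('<' :: (tw ++ ' ' :: after)) =
                String.ofList ['<'] :: aLoop fuel (tw ++ ' ' :: after) := by
              simp only [aLoop]
              by_cases he : PySem.Chars.find ('<' :: (tw ++ ' ' :: after)) ['>'] = -1
              case pos =>
                rw [he]
                simp
              case neg =>
                have hm1 := PySem.Chars.neg_one_le_find ('<' :: (tw ++ ' ' :: after)) ['>']
                have h0 : 0 ≤ PySem.Chars.find ('<' :: (tw ++ ' ' :: after)) ['>'] := by omega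
                obtain ⟨hat, hmin⟩ := PySem.Chars.find_spec h0
                have hlenf := PySem.Chars.find_le_length ('<' :: (tw ++ ' ' :: after)) ['>']
                have hk : tw.length + 2 ≤
                    (PySem.Chars.find ('<' :: (tw ++ ' ' :: after)) ['>']).toNat := by
                  by_contra hk'
                  rw [singleton_prefix_iff, List.head?_drop] at hat
                  cases ht : (PySem.Chars.find ('<' :: (tw ++ ' ' :: after)) ['>']).toNat with
                  | zero => rw [ht] at hat; simp at hat
                  | succ i =>
                    rw [ht] at hk'
                    rw [ht, List.getElem?_cons_succ] at hat
                    by_cases hi : i < tw.length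
                    · rw [List.getElem?_append_left hi] at hat
                      exact (hbm' _ (List.mem_of_getElem? hat)).1 rfl
                    · have hieq : i = tw.length := by omega
                      rw [hieq, List.getElem?_append_right (le_refl _), Nat.sub_self] at hat
                      simp at hat
                have hsp : PySem.Chars.isIn [' ']
                    (PySem.List.slice ('<' :: (tw ++ ' ' :: after)) (some 1)
                      (some (PySem.Chars.find ('<' :: (tw ++ ' ' :: after)) ['>']))) = true := by
                  rw [PySem.List.slice_of_nonneg _ (by omega) h0
                    (by simp only [List.length_cons, List.length_append]; omega) hlenf]
                  rw [PySem.Chars.isIn_iff_infix, singleton_infix_iff]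
                  simp only [Int.toNat_one, List.drop_one, List.tail_cons]
                  apply List.mem_of_getElem? (i := tw.length)
                  rw [List.getElem?_take, if_pos (by omega),
                    List.getElem?_append_right (le_refl _), Nat.sub_self]
                  rfl
                simp [hsp]
            rw [hA, hB]
            exact congrArg _ (ih (tw ++ ' ' :: after) hlen0)

-- ===== VERDICT (by name: the statement is the Claim_ definition above) =====
theorem analyze_payload_stream_spec : Claim_equal_analyze_payload_stream := by
  intro payload _
  unfold Spec_analyze_payload_stream analyze_payload_stream analyze_payload_stream_alt
  exact key payload.toList.length payload.toList (le_refl _)
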